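-- pv_equiv track=rewrite | github.com/chenxu0602/LeetCode | 1319.number-of-operations-to-make-network-connected.py | makeConnected
-- ===== SOURCE A (Python) =====
-- from typing import List
--
-- def makeConnected(n: int, connections: List[List[int]]) -> int:
--
--     # if len(connections) < n - 1:
--     #     return False
--     # s = "".join(map(chr, range(n)))
--     # for a, b in connections:
--     #     s = s.replace(s[a], s[b])
--     # return len(set(s)) - 1
--
--     if len(connections) < n - 1:
--         return -1
--
--     G = [set() for i in range(n)]
--     for i, j in connections:
--         G[i].add(j)
--         G[j].add(i)
--
--     seen = [0] * n
--
--     def dfs(i):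
--         if seen[i]:
--             return 0
--         seen[i] = 1
--         for j in G[i]:
--             dfs(j)
--         return 1
--
--     return sum(dfs(i) for i in range(n)) - 1
-- ===== SOURCE B (Python) =====
-- def makeConnected(n, connections):
--     if len(connections) < n - 1:
--         return -1
--     comp = list(range(n))
--     components = n
--     for i, j in connections:
--         a, b = comp[i], comp[j]
--         if a != b:
--             comp = [a if c == b else c for c in comp]
--             components -= 1
--     return components - 1
-- ===== Notes on version B (the rewrite author's own statement) =====
-- stated objective: alternative
-- what changed: Replaces A's adjacency-set graph plus recursive DFS component count with an incremental label-merging scan: a label array starts as the identity, each edge relabels one endpoint's component label to the other's and decrements a component counter.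
-- outside the precondition, e.g. on makeConnected(-1, []): A returns -1, B returns -2; on makeConnected(2, [[0, -1]]): A returns 0, B returns 0; on makeConnected(2, [[0, 2]]): A raises IndexError, B raises IndexError
import Mathlib
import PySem

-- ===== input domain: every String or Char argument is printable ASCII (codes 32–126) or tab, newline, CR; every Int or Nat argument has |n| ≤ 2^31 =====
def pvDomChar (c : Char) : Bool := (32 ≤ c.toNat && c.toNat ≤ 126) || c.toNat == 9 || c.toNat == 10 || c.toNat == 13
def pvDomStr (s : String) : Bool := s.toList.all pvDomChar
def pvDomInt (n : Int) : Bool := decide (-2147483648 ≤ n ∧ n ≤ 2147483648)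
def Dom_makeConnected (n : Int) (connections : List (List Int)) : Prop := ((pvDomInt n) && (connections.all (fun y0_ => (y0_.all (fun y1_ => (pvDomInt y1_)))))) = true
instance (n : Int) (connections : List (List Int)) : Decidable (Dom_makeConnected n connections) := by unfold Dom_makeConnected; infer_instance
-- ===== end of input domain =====

-- B replaces A's adjacency-set graph + recursive DFS component count by an incremental
-- label-merging scan over the edges (alternative algorithm, not claimed faster).

-- ===== PORT A =====
-- dfs(i) of A; the Nat argument is a fuel guard making the recursion total (n.toNat at the
-- top level always suffices: each non-trivial call marks one more of the n cells of `seen`).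
def dfsA (G : List (PySem.Set Int)) : Nat → List Int → Int → Int × List Int
  | 0, seen, _ => (0, seen)
  | fuel+1, seen, i =>
    if PySem.List.pyGetD seen i 0 ≠ 0 then (0, seen)
    else
      let seen1 := PySem.List.pySetD seen i 1
      let seen2 := (PySem.List.pyGetD G i PySem.Set.empty).foldl
        (fun s j => (dfsA G fuel s j).2) seen1
      (1, seen2)

-- pyGetD/pySetD are exact for in-range indices, which Pre_ guarantees.
def makeConnected (n : Int) (connections : List (List Int)) : Int :=
  if (connections.length : Int) < n - 1 then -1
  else
    let G := connections.foldl (fun G e =>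
      let i := PySem.List.pyGetD e 0 0
      let j := PySem.List.pyGetD e 1 0
      let G1 := PySem.List.pySetD G i (PySem.Set.add (PySem.List.pyGetD G i PySem.Set.empty) j)
      PySem.List.pySetD G1 j (PySem.Set.add (PySem.List.pyGetD G1 j PySem.Set.empty) i))
      (List.replicate n.toNat PySem.Set.empty)
    let seen := List.replicate n.toNat (0 : Int)
    let r := (PySem.List.pyRange 0 n 1).foldl (fun (st : Int × List Int) i =>
        let p := dfsA G n.toNat st.2 i
        (st.1 + p.1, p.2)) (0, seen)
    r.1 - 1

-- ===== PORT B =====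
def makeConnected_alt (n : Int) (connections : List (List Int)) : Int :=
  if (connections.length : Int) < n - 1 then -1
  else
    let st := connections.foldl (fun (st : List Int × Int) e =>
      let a := PySem.List.pyGetD st.1 (PySem.List.pyGetD e 0 0) 0
      let b := PySem.List.pyGetD st.1 (PySem.List.pyGetD e 1 0) 0
      if a ≠ b then (st.1.map (fun c => if c = b then a else c), st.2 - 1) else st)
      (PySem.List.pyRange 0 n 1, n)
    st.2 - 1

-- ===== PRECONDITION & SPEC =====
-- Pre_ admits every input on which the early `len(connections) < n - 1` guard fires (both
-- return -1 there whatever the edges are), and otherwise keeps the natural domain: n ≥ 0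
-- (a negative node count is malformed input) and each connection a pair of node indices in
-- [0, n).  Outside it A raises (IndexError for an index out of range [-n, n), ValueError for
-- a connection whose length is not 2), except that negative in-range indices are excluded
-- too: there both programs return, agreeing only through Python's accidental negative-index
-- wraparound.
def Pre_makeConnected (n : Int) (connections : List (List Int)) : Prop :=
  ((connections.length : Int) < n - 1) ∨
  (0 ≤ n ∧ ∀ e ∈ connections, e.length = 2 ∧ ∀ x ∈ e, 0 ≤ x ∧ x < n)
instance (n : Int) (connections : List (List Int)) : Decidable (Pre_makeConnected n connections) := by
  unfold Pre_makeConnected; infer_instance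

def pvWitness_makeConnected : Int × List (List Int) := (4, [[0, 1], [2, 1], [0, 0]])

def Spec_makeConnected (n : Int) (connections : List (List Int)) (out : Int) : Prop := out = makeConnected_alt n connections
instance (n : Int) (connections : List (List Int)) (out : Int) : Decidable (Spec_makeConnected n connections out) := by unfold Spec_makeConnected; infer_instance

-- ===== CLAIM (what is proved, stated in full; the proofs are below) =====
def Claim_equal_makeConnected : Prop := ∀ (n : Int) (connections : List (List Int)), Dom_makeConnected n connections → Pre_makeConnected n connections → Spec_makeConnected n connections (makeConnected n connections)

-- ===== LEMMAS AND PROOFS =====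

-- the undirected edge relation of a connection list, and reachability along it
def adjE (cs : List (List Int)) (x y : Int) : Prop :=
  ∃ e ∈ cs, (PySem.List.pyGetD e 0 0 = x ∧ PySem.List.pyGetD e 1 0 = y) ∨
            (PySem.List.pyGetD e 0 0 = y ∧ PySem.List.pyGetD e 1 0 = x)

def ReachE (cs : List (List Int)) : Int → Int → Prop := Relation.ReflTransGen (adjE cs)

-- membership in the seen array / value of the comp array, at an Int node
def memS (s : List Int) (x : Int) : Prop := PySem.List.pyGetD s x 0 ≠ 0
def valC (s : List Int) (x : Int) : Int := PySem.List.pyGetD s x 0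

-- generic foldl invariant
theorem foldl_pres {β γ : Type} (P : β → Prop) (step : β → γ → β) (l : List γ) (s : β)
    (h : P s) (hstep : ∀ t j, j ∈ l → P t → P (step t j)) : P (l.foldl step s) := by
  induction l generalizing s with
  | nil => exact h
  | cons a l ih =>
    exact ih _ (hstep s a (by simp) h) (fun t j hj => hstep t j (by simp [hj]))

-- indexing bridges (exact for the in-range indices all invariants carry)
theorem getD_upd {α : Type} (xs : List α) (i j : Int) (v d : α)
    (hi0 : 0 ≤ i) (hi : i < xs.length) (hj0 : 0 ≤ j) (hj : j < xs.length) :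
    PySem.List.pyGetD (PySem.List.pySetD xs i v) j d =
      if j = i then v else PySem.List.pyGetD xs j d := by
  rw [PySem.List.pySetD_of_nonneg xs v hi0]
  have hj' : j < (((xs.set i.toNat v).length : Nat) : Int) := by simpa using hj
  rw [PySem.List.pyGetD_eq_getElem _ d hj0 hj']
  by_cases h : j = i
  · subst h; simp [List.getElem_set]
  · have hne : i.toNat ≠ j.toNat := by omega
    rw [PySem.List.pyGetD_eq_getElem xs d hj0 hj]
    simp [List.getElem_set, hne, h]

theorem getD_map' {α β : Type} (f : α → β) (xs : List α) (i : Int) (d : α) (d' : β)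
    (h0 : 0 ≤ i) (h : i < xs.length) :
    PySem.List.pyGetD (xs.map f) i d' = f (PySem.List.pyGetD xs i d) := by
  have h' : i < (((xs.map f).length : Nat) : Int) := by simpa using h
  rw [PySem.List.pyGetD_eq_getElem _ d' h0 h', PySem.List.pyGetD_eq_getElem xs d h0 h]
  simp

theorem len_setD {α : Type} (xs : List α) (i : Int) (v : α) :
    (PySem.List.pySetD xs i v).length = xs.length := PySem.List.length_pySetD xs i v

theorem getD_replicate_zero (m : Nat) (x : Int) :
    PySem.List.pyGetD (List.replicate m (0 : Int)) x 0 = 0 := by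
  by_cases hr : PySem.Raise.InRange (List.replicate m (0 : Int)).length x
  · exact List.eq_of_mem_replicate (PySem.List.pyGetD_mem _ _ hr)
  · exact PySem.List.pyGetD_of_none _ _ _ ((PySem.List.pyGet?_eq_none_iff _ _).2 hr)

theorem getD_pyRange_id (n x : Int) (h0 : 0 ≤ x) (h : x < n) :
    PySem.List.pyGetD (PySem.List.pyRange 0 n 1) x 0 = x := by
  have := PySem.List.pyGetD_map_pyRange_of_nonneg (fun z => z) n x 0 h0 h
  simpa using this

-- zero count of the seen array (fuel measure)
def zc (xs : List Int) : Nat := xs.countP (fun x => x == 0)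

theorem countP_set_lt (xs : List Int) (k : Nat) (hk : k < xs.length) (h0 : xs[k] = 0) :
    zc (xs.set k 1) < zc xs := by
  induction xs generalizing k with
  | nil => simp at hk
  | cons a t ih =>
    cases k with
    | zero =>
      simp only [List.getElem_cons_zero] at h0
      subst h0; simp [zc, List.countP_cons]
    | succ k =>
      simp only [List.getElem_cons_succ] at h0
      have := ih k (by simpa using hk) h0
      simp [zc, List.countP_cons] at this ⊢
      omega

theorem zc_le (xs : List Int) : zc xs ≤ xs.length := List.countP_le_length

theorem zc_zero_all (xs : List Int) (hz : zc xs = 0) (i : Int)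
    (h0 : 0 ≤ i) (h : i < xs.length) : memS xs i := by
  have hmem : PySem.List.pyGetD xs i 0 ∈ xs := by
    rw [PySem.List.pyGetD_eq_getElem xs 0 h0 h]; exact List.getElem_mem _
  have := (List.countP_eq_zero).1 hz _ hmem
  unfold memS
  intro hcontra
  exact this (by simp [hcontra])

theorem zc_set (xs : List Int) (i : Int) (h0 : 0 ≤ i) (h : i < xs.length)
    (hm : ¬ memS xs i) : zc (PySem.List.pySetD xs i 1) < zc xs := by
  rw [PySem.List.pySetD_of_nonneg xs 1 h0]
  have hk : i.toNat < xs.length := by omega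
  have h0' : xs[i.toNat] = 0 := by
    have := PySem.List.pyGetD_eq_getElem xs 0 h0 h
    unfold memS at hm; simp only [this] at hm; omega
  exact countP_set_lt xs i.toNat hk h0'

-- edge well-formedness (the second half of Pre_)
def edgesOK (n : Int) (cs : List (List Int)) : Prop :=
  ∀ e ∈ cs, e.length = 2 ∧ ∀ x ∈ e, 0 ≤ x ∧ x < n

theorem len2_ex (e : List Int) (h : e.length = 2) : ∃ a b, e = [a, b] := by
  match e, h with
  | [a, b], _ => exact ⟨a, b, rfl⟩

theorem getD_pair0 (a b : Int) : PySem.List.pyGetD [a, b] 0 0 = a :=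
  PySem.List.pyGetD_zero_cons a [b] 0

theorem getD_pair1 (a b : Int) : PySem.List.pyGetD [a, b] 1 0 = b := by
  have := PySem.List.pyGetD_ofNat [a, b] 1 0 (by simp)
  simpa using this

theorem pair_eq (e : List Int) (h : e.length = 2) :
    e = [PySem.List.pyGetD e 0 0, PySem.List.pyGetD e 1 0] := by
  obtain ⟨a, b, rfl⟩ := len2_ex e h
  rw [getD_pair0, getD_pair1]

theorem adjE_bounds {n : Int} {cs : List (List Int)} (hok : edgesOK n cs) {x y : Int}
    (h : adjE cs x y) : (0 ≤ x ∧ x < n) ∧ (0 ≤ y ∧ y < n) := by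
  obtain ⟨e, he, hc⟩ := h
  obtain ⟨hlen, hmem⟩ := hok e he
  obtain ⟨a, b, rfl⟩ := len2_ex e hlen
  rw [getD_pair0, getD_pair1] at hc
  have ha := hmem a (by simp)
  have hb := hmem b (by simp)
  rcases hc with ⟨rfl, rfl⟩ | ⟨rfl, rfl⟩
  · exact ⟨ha, hb⟩
  · exact ⟨hb, ha⟩

theorem adjE_symm {cs : List (List Int)} {x y : Int} (h : adjE cs x y) : adjE cs y x := by
  obtain ⟨e, he, hc⟩ := h
  exact ⟨e, he, hc.symm⟩

theorem reachE_symm {cs : List (List Int)} {x y : Int} (h : ReachE cs x y) : ReachE cs y x := by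
  induction h with
  | refl => exact .refl
  | tail _ hadj ih => exact Relation.ReflTransGen.trans (.single (adjE_symm hadj)) ih

theorem adjE_append {cs ds : List (List Int)} {x y : Int} :
    adjE (cs ++ ds) x y ↔ adjE cs x y ∨ adjE ds x y := by
  unfold adjE
  constructor
  · rintro ⟨e, he, hc⟩
    rcases List.mem_append.1 he with h | h
    · exact Or.inl ⟨e, h, hc⟩
    · exact Or.inr ⟨e, h, hc⟩
  · rintro (⟨e, he, hc⟩ | ⟨e, he, hc⟩)
    · exact ⟨e, List.mem_append.2 (Or.inl he), hc⟩
    · exact ⟨e, List.mem_append.2 (Or.inr he), hc⟩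

theorem adjE_single {e : List Int} {x y : Int} :
    adjE [e] x y ↔ ((PySem.List.pyGetD e 0 0 = x ∧ PySem.List.pyGetD e 1 0 = y) ∨
                    (PySem.List.pyGetD e 0 0 = y ∧ PySem.List.pyGetD e 1 0 = x)) := by
  unfold adjE; simp

theorem reach_mono {cs : List (List Int)} (ds : List (List Int)) {x y : Int}
    (h : ReachE cs x y) : ReachE (cs ++ ds) x y := by
  induction h with
  | refl => exact .refl
  | tail _ hadj ih => exact .tail ih (adjE_append.2 (Or.inl hadj))

theorem reach_snoc {cs : List (List Int)} {e : List Int} {i j : Int}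
    (hi : PySem.List.pyGetD e 0 0 = i) (hj : PySem.List.pyGetD e 1 0 = j) (x y : Int) :
    ReachE (cs ++ [e]) x y ↔
      ReachE cs x y ∨ (ReachE cs x i ∧ ReachE cs j y) ∨ (ReachE cs x j ∧ ReachE cs i y) := by
  constructor
  · intro h
    induction h with
    | refl => exact Or.inl .refl
    | tail _ hadj ih =>
      rename_i b c _
      rcases adjE_append.1 hadj with hold | hnew
      · rcases ih with h1 | ⟨h1, h2⟩ | ⟨h1, h2⟩
        · exact Or.inl (.tail h1 hold)
        · exact Or.inr (Or.inl ⟨h1, .tail h2 hold⟩)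
        · exact Or.inr (Or.inr ⟨h1, .tail h2 hold⟩)
      · rw [adjE_single, hi, hj] at hnew
        rcases hnew with ⟨rfl, rfl⟩ | ⟨rfl, rfl⟩
        · rcases ih with h1 | ⟨h1, h2⟩ | ⟨h1, h2⟩
          · exact Or.inr (Or.inl ⟨h1, .refl⟩)
          · exact Or.inr (Or.inl ⟨h1, .refl⟩)
          · exact Or.inl h1
        · rcases ih with h1 | ⟨h1, h2⟩ | ⟨h1, h2⟩
          · exact Or.inr (Or.inr ⟨h1, .refl⟩)
          · exact Or.inl h1
          · exact Or.inr (Or.inr ⟨h1, .refl⟩)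
  · have hstep : adjE (cs ++ [e]) i j :=
      adjE_append.2 (Or.inr (adjE_single.2 (Or.inl ⟨hi, hj⟩)))
    rintro (h | ⟨h1, h2⟩ | ⟨h1, h2⟩)
    · exact reach_mono [e] h
    · exact Relation.ReflTransGen.trans (.tail (reach_mono [e] h1) hstep) (reach_mono [e] h2)
    · exact Relation.ReflTransGen.trans (.tail (reach_mono [e] h1) (adjE_symm hstep))
        (reach_mono [e] h2)

theorem reach_snoc_same {cs : List (List Int)} {e : List Int} {i j : Int}
    (hi : PySem.List.pyGetD e 0 0 = i) (hj : PySem.List.pyGetD e 1 0 = j)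
    (hij : ReachE cs i j) (x y : Int) : ReachE (cs ++ [e]) x y ↔ ReachE cs x y := by
  rw [reach_snoc hi hj]
  constructor
  · rintro (h | ⟨h1, h2⟩ | ⟨h1, h2⟩)
    · exact h
    · exact Relation.ReflTransGen.trans (Relation.ReflTransGen.trans h1 hij) h2
    · exact Relation.ReflTransGen.trans (Relation.ReflTransGen.trans h1 (reachE_symm hij)) h2
  · exact Or.inl

theorem reach_nil {x y : Int} : ReachE [] x y ↔ x = y := by
  constructor
  · intro h
    induction h with
    | refl => rfl
    | tail _ hadj _ => exact absurd hadj (by simp [adjE])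
  · rintro rfl; exact .refl

-- membership in the seen array after marking one node
theorem memS_set {s : List Int} {i x : Int} (hi0 : 0 ≤ i) (hi : i < (s.length : Int))
    (hx0 : 0 ≤ x) (hx : x < (s.length : Int)) :
    memS (PySem.List.pySetD s i 1) x ↔ (x = i ∨ memS s x) := by
  unfold memS
  rw [getD_upd s i x 1 0 hi0 hi hx0 hx]
  split <;> simp_all

-- closure of a seen array, up to a frontier F
def ClosedX (n : Int) (cs : List (List Int)) (s : List Int) (F : Int → Prop) : Prop :=
  ∀ x y, 0 ≤ x → x < n → memS s x → adjE cs x y → memS s y ∨ F y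

theorem dfs_basic {n : Int} {G : List (PySem.Set Int)} {cs : List (List Int)}
    (hn : 0 ≤ n) (hok : edgesOK n cs)
    (hG : ∀ i, 0 ≤ i → i < n → ∀ j, j ∈ PySem.List.pyGetD G i PySem.Set.empty ↔ adjE cs i j) :
    ∀ fuel s i, 0 ≤ i → i < n → s.length = n.toNat →
      (dfsA G fuel s i).2.length = n.toNat ∧
      (∀ x, 0 ≤ x → x < n → memS s x → memS (dfsA G fuel s i).2 x) ∧
      zc (dfsA G fuel s i).2 ≤ zc s ∧
      (∀ x, 0 ≤ x → x < n → memS (dfsA G fuel s i).2 x → memS s x ∨ ReachE cs i x) := by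
  intro fuel
  induction fuel with
  | zero => intro s i _ _ hlen; exact ⟨hlen, fun x _ _ h => h, le_refl _, fun x _ _ h => Or.inl h⟩
  | succ fuel ih =>
    intro s i hi0 hi hlen
    have hlenInt : (s.length : Int) = n := by rw [hlen]; omega
    by_cases hm : memS s i
    · unfold memS at hm; simp only [dfsA, if_pos hm]
      exact ⟨hlen, fun x _ _ h => h, le_refl _, fun x _ _ h => Or.inl h⟩
    · have hm' := hm; unfold memS at hm'
      simp only [dfsA, if_neg hm']
      set s1 := PySem.List.pySetD s i 1 with hs1
      have hlen1 : s1.length = n.toNat := by rw [hs1, len_setD]; exact hlen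
      have hmem1 : ∀ x, 0 ≤ x → x < n → (memS s1 x ↔ (x = i ∨ memS s x)) := by
        intro x hx0 hx
        exact memS_set hi0 (by omega) hx0 (by omega)
      have hzc1 : zc s1 ≤ zc s := le_of_lt (zc_set s i hi0 (by omega) hm)
      -- invariant of the neighbour fold
      have hfold := foldl_pres (fun t => t.length = n.toNat ∧ zc t ≤ zc s1 ∧
          (∀ x, 0 ≤ x → x < n → memS s1 x → memS t x) ∧
          (∀ x, 0 ≤ x → x < n → memS t x → memS s1 x ∨ ReachE cs i x))
        (fun t j => (dfsA G fuel t j).2)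
        (PySem.List.pyGetD G i PySem.Set.empty) s1
        ⟨hlen1, le_refl _, fun _ _ _ h => h, fun x _ _ h => Or.inl h⟩
        (by
          intro t j hj ⟨htlen, htzc, htmono, htsub⟩
          have hadj : adjE cs i j := (hG i hi0 hi j).1 hj
          have hjb := (adjE_bounds hok hadj).2
          obtain ⟨h1, h2, h3, h4⟩ := ih t j hjb.1 hjb.2 htlen
          refine ⟨h1, le_trans h3 htzc, fun x hx0 hx hmx => h2 x hx0 hx (htmono x hx0 hx hmx), ?_⟩
          intro x hx0 hx hmx
          rcases h4 x hx0 hx hmx with h | h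
          · exact htsub x hx0 hx h
          · exact Or.inr (Relation.ReflTransGen.trans (.single hadj) h))
      obtain ⟨h1, h2, h3, h4⟩ := hfold
      refine ⟨h1, ?_, le_trans h2 hzc1, ?_⟩
      · intro x hx0 hx hmx
        exact h3 x hx0 hx ((hmem1 x hx0 hx).2 (Or.inr hmx))
      · intro x hx0 hx hmx
        rcases h4 x hx0 hx hmx with h | h
        · rcases (hmem1 x hx0 hx).1 h with rfl | h
          · exact Or.inr .refl
          · exact Or.inl h
        · exact Or.inr h

theorem dfs_marks {n : Int} {G : List (PySem.Set Int)} {cs : List (List Int)}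
    (hn : 0 ≤ n) (hok : edgesOK n cs)
    (hG : ∀ i, 0 ≤ i → i < n → ∀ j, j ∈ PySem.List.pyGetD G i PySem.Set.empty ↔ adjE cs i j) :
    ∀ fuel s i, 0 ≤ i → i < n → s.length = n.toNat → zc s ≤ fuel →
      memS (dfsA G fuel s i).2 i := by
  intro fuel s i hi0 hi hlen hfuel
  cases fuel with
  | zero =>
    have : memS s i := zc_zero_all s (by omega) i hi0 (by omega)
    simpa [dfsA] using this
  | succ fuel =>
    by_cases hm : memS s i
    · have hm' := hm; unfold memS at hm'
      simp only [dfsA, if_pos hm']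
      exact hm
    · have hm' := hm; unfold memS at hm'
      simp only [dfsA, if_neg hm']
      set s1 := PySem.List.pySetD s i 1 with hs1
      have hlen1 : s1.length = n.toNat := by rw [hs1, len_setD]; exact hlen
      have hm1 : memS s1 i := by
        rw [hs1, memS_set hi0 (by omega) hi0 (by omega)]; exact Or.inl rfl
      exact foldl_pres (fun t => t.length = n.toNat ∧ memS t i)
        (fun t j => (dfsA G fuel t j).2) _ s1 ⟨hlen1, hm1⟩
        (by
          intro t j hj ⟨htlen, htm⟩
          have hadj : adjE cs i j := (hG i hi0 hi j).1 hj
          have hjb := (adjE_bounds hok hadj).2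
          obtain ⟨h1, h2, _, _⟩ := dfs_basic hn hok hG fuel t j hjb.1 hjb.2 htlen
          exact ⟨h1, h2 i hi0 hi htm⟩) |>.2

theorem dfs_ret {n : Int} {G : List (PySem.Set Int)} {cs : List (List Int)}
    (hn : 0 ≤ n) :
    ∀ fuel s i, 0 ≤ i → i < n → s.length = n.toNat → zc s ≤ fuel →
      (memS s i → (dfsA G fuel s i).1 = 0) ∧ (¬ memS s i → (dfsA G fuel s i).1 = 1) := by
  intro fuel s i hi0 hi hlen hfuel
  cases fuel with
  | zero =>
    have hms : memS s i := zc_zero_all s (by omega) i hi0 (by omega)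
    exact ⟨fun _ => rfl, fun h => absurd hms h⟩
  | succ fuel =>
    constructor
    · intro hm; have hm' := hm; unfold memS at hm'; simp [dfsA, hm']
    · intro hm; have hm' := hm; unfold memS at hm'; simp only [not_not] at hm'
      simp [dfsA, hm']

theorem dfs_closed {n : Int} {G : List (PySem.Set Int)} {cs : List (List Int)}
    (hn : 0 ≤ n) (hok : edgesOK n cs)
    (hG : ∀ i, 0 ≤ i → i < n → ∀ j, j ∈ PySem.List.pyGetD G i PySem.Set.empty ↔ adjE cs i j) :
    ∀ fuel s i (X : Int → Prop), 0 ≤ i → i < n → s.length = n.toNat → zc s ≤ fuel →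
      ClosedX n cs s (fun y => y = i ∨ X y) → ClosedX n cs (dfsA G fuel s i).2 X := by
  intro fuel
  induction fuel with
  | zero =>
    intro s i X hi0 hi hlen hfuel hcl
    intro x y hx0 hx hmx hadj
    have hmem : ∀ z, 0 ≤ z → z < n → memS s z :=
      fun z hz0 hz => zc_zero_all s (by omega) z hz0 (by omega)
    simp only [dfsA]
    rcases hcl x y hx0 hx (by simpa [dfsA] using hmx) hadj with h | rfl | h
    · exact Or.inl h
    · exact Or.inl (hmem _ hi0 hi)
    · exact Or.inr h
  | succ fuel ih =>
    intro s i X hi0 hi hlen hfuel hcl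
    by_cases hm : memS s i
    · have hm' := hm; unfold memS at hm'
      simp only [dfsA, if_pos hm']
      intro x y hx0 hx hmx hadj
      rcases hcl x y hx0 hx hmx hadj with h | rfl | h
      · exact Or.inl h
      · exact Or.inl hm
      · exact Or.inr h
    · have hm' := hm; unfold memS at hm'
      simp only [dfsA, if_neg hm']
      set s1 := PySem.List.pySetD s i 1 with hs1
      have hlen1 : s1.length = n.toNat := by rw [hs1, len_setD]; exact hlen
      have hmem1 : ∀ x, 0 ≤ x → x < n → (memS s1 x ↔ (x = i ∨ memS s x)) := by
        intro x hx0 hx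
        exact memS_set hi0 (by omega) hx0 (by omega)
      have hzc1 : zc s1 ≤ fuel := by
        have hlt := zc_set s i hi0 (by omega) hm
        rw [← hs1] at hlt; omega
      -- after marking i, the array is closed up to i's neighbour list plus X
      have hcl1 : ClosedX n cs s1 (fun y => y ∈ PySem.List.pyGetD G i PySem.Set.empty ∨ X y) := by
        intro x y hx0 hx hmx hadj
        rcases (hmem1 x hx0 hx).1 hmx with rfl | hmx'
        · exact Or.inr (Or.inl ((hG x hx0 hx y).2 hadj))
        · rcases hcl x y hx0 hx hmx' hadj with h | rfl | h
          · have hyb := (adjE_bounds hok hadj).2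
            exact Or.inl ((hmem1 y hyb.1 hyb.2).2 (Or.inr h))
          · exact Or.inl ((hmem1 y hi0 hi).2 (Or.inl rfl))
          · exact Or.inr (Or.inr h)
      -- fold over the neighbour list, discharging it from the frontier
      have aux : ∀ (js : List Int) t, (∀ j ∈ js, 0 ≤ j ∧ j < n) → t.length = n.toNat →
          zc t ≤ fuel → ClosedX n cs t (fun y => y ∈ js ∨ X y) →
          ClosedX n cs (js.foldl (fun u j => (dfsA G fuel u j).2) t) X := by
        intro js
        induction js with
        | nil =>
          intro t _ _ _ hclt
          intro x y hx0 hx hmx hadj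
          rcases hclt x y hx0 hx hmx hadj with h | h | h
          · exact Or.inl h
          · simp at h
          · exact Or.inr h
        | cons j js ihjs =>
          intro t hjb htlen htzc hclt
          have hjb' := hjb j (by simp)
          have hclt' : ClosedX n cs t (fun y => y = j ∨ (y ∈ js ∨ X y)) := by
            intro x y hx0 hx hmx hadj
            rcases hclt x y hx0 hx hmx hadj with h | h | h
            · exact Or.inl h
            · simp only [List.mem_cons] at h
              rcases h with h | h
              · exact Or.inr (Or.inl h)
              · exact Or.inr (Or.inr (Or.inl h))
            · exact Or.inr (Or.inr (Or.inr h))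
          have hnext := ih t j (fun y => y ∈ js ∨ X y) hjb'.1 hjb'.2 htlen htzc hclt'
          obtain ⟨h1, _, h3, _⟩ := dfs_basic hn hok hG fuel t j hjb'.1 hjb'.2 htlen
          exact ihjs (dfsA G fuel t j).2 (fun j' hj' => hjb j' (by simp [hj'])) h1
            (le_trans h3 htzc) hnext
      exact aux _ s1
        (fun j hj => ((adjE_bounds hok ((hG i hi0 hi j).1 hj)).2))
        hlen1 hzc1 hcl1

theorem dfs_full {n : Int} {G : List (PySem.Set Int)} {cs : List (List Int)}
    (hn : 0 ≤ n) (hok : edgesOK n cs)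
    (hG : ∀ i, 0 ≤ i → i < n → ∀ j, j ∈ PySem.List.pyGetD G i PySem.Set.empty ↔ adjE cs i j)
    (fuel : Nat) (s : List Int) (i : Int) (hi0 : 0 ≤ i) (hi : i < n)
    (hlen : s.length = n.toNat) (hfuel : zc s ≤ fuel)
    (hclosed : ClosedX n cs s (fun _ => False)) :
    (∀ x, 0 ≤ x → x < n → (memS (dfsA G fuel s i).2 x ↔ (memS s x ∨ ReachE cs i x))) ∧
    ClosedX n cs (dfsA G fuel s i).2 (fun _ => False) ∧
    ((memS s i → (dfsA G fuel s i).1 = 0) ∧ (¬ memS s i → (dfsA G fuel s i).1 = 1)) ∧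
    (dfsA G fuel s i).2.length = n.toNat := by
  obtain ⟨h1, h2, h3, h4⟩ := dfs_basic hn hok hG fuel s i hi0 hi hlen
  have hcl2 : ClosedX n cs (dfsA G fuel s i).2 (fun _ => False) :=
    dfs_closed hn hok hG fuel s i (fun _ => False) hi0 hi hlen hfuel
      (fun x y hx0 hx hmx hadj => by
        rcases hclosed x y hx0 hx hmx hadj with h | h
        · exact Or.inl h
        · exact absurd h not_false)
  refine ⟨?_, hcl2, dfs_ret (cs := cs) hn fuel s i hi0 hi hlen hfuel, h1⟩
  intro x hx0 hx
  constructor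
  · exact h4 x hx0 hx
  · rintro (h | h)
    · exact h2 x hx0 hx h
    · clear hx0 hx
      induction h with
      | refl => exact dfs_marks hn hok hG fuel s i hi0 hi hlen hfuel
      | tail hreach hadj ihr =>
        have hbb := adjE_bounds hok hadj
        rcases hcl2 _ _ hbb.1.1 hbb.1.2 ihr hadj with h' | h'
        · exact h'
        · exact absurd h' not_false

theorem getD_replicate_self {α : Type} (m : Nat) (v : α) (x : Int) :
    PySem.List.pyGetD (List.replicate m v) x v = v := by
  by_cases hr : PySem.Raise.InRange (List.replicate m v).length x
  · exact List.eq_of_mem_replicate (PySem.List.pyGetD_mem _ _ hr)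
  · exact PySem.List.pyGetD_of_none _ _ _ ((PySem.List.pyGet?_eq_none_iff _ _).2 hr)

theorem adj_snoc_char {proc : List (List Int)} {e : List Int} {k x : Int} :
    adjE (proc ++ [e]) k x ↔ adjE proc k x ∨
      (k = PySem.List.pyGetD e 0 0 ∧ x = PySem.List.pyGetD e 1 0) ∨
      (k = PySem.List.pyGetD e 1 0 ∧ x = PySem.List.pyGetD e 0 0) := by
  rw [adjE_append, adjE_single]
  constructor
  · rintro (h | ⟨h1, h2⟩ | ⟨h1, h2⟩)
    · exact Or.inl h
    · exact Or.inr (Or.inl ⟨h1.symm, h2.symm⟩)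
    · exact Or.inr (Or.inr ⟨h2.symm, h1.symm⟩)
  · rintro (h | ⟨h1, h2⟩ | ⟨h1, h2⟩)
    · exact Or.inl h
    · exact Or.inr (Or.inl ⟨h1.symm, h2.symm⟩)
    · exact Or.inr (Or.inr ⟨h2.symm, h1.symm⟩)

theorem buildG {n : Int} (hn : 0 ≤ n) :
    ∀ (suffix proc : List (List Int)) (Gacc : List (PySem.Set Int)),
    edgesOK n suffix → Gacc.length = n.toNat →
    (∀ i, 0 ≤ i → i < n → ∀ x, x ∈ PySem.List.pyGetD Gacc i PySem.Set.empty ↔ adjE proc i x) →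
    ((suffix.foldl (fun G e =>
        let i := PySem.List.pyGetD e 0 0
        let j := PySem.List.pyGetD e 1 0
        let G1 := PySem.List.pySetD G i (PySem.Set.add (PySem.List.pyGetD G i PySem.Set.empty) j)
        PySem.List.pySetD G1 j (PySem.Set.add (PySem.List.pyGetD G1 j PySem.Set.empty) i)) Gacc).length = n.toNat ∧
     ∀ i, 0 ≤ i → i < n → ∀ x,
       x ∈ PySem.List.pyGetD (suffix.foldl (fun G e =>
        let i := PySem.List.pyGetD e 0 0
        let j := PySem.List.pyGetD e 1 0
        let G1 := PySem.List.pySetD G i (PySem.Set.add (PySem.List.pyGetD G i PySem.Set.empty) j)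
        PySem.List.pySetD G1 j (PySem.Set.add (PySem.List.pyGetD G1 j PySem.Set.empty) i)) Gacc) i PySem.Set.empty ↔
       adjE (proc ++ suffix) i x) := by
  intro suffix
  induction suffix with
  | nil =>
    intro proc Gacc _ hlen hch
    simpa using ⟨hlen, hch⟩
  | cons e es ihs =>
    intro proc Gacc hok hlen hch
    have hoke := hok e (by simp)
    have hokes : edgesOK n es := fun e' he' => hok e' (by simp [he'])
    set i := PySem.List.pyGetD e 0 0 with hie
    set j := PySem.List.pyGetD e 1 0 with hje
    have hib : 0 ≤ i ∧ i < n := by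
      have : i ∈ e := by rw [pair_eq e hoke.1, ← hie, ← hje]; simp
      exact hoke.2 i this
    have hjb : 0 ≤ j ∧ j < n := by
      have : j ∈ e := by rw [pair_eq e hoke.1, ← hie, ← hje]; simp
      exact hoke.2 j this
    set G1 := PySem.List.pySetD Gacc i (PySem.Set.add (PySem.List.pyGetD Gacc i PySem.Set.empty) j) with hG1
    set G2 := PySem.List.pySetD G1 j (PySem.Set.add (PySem.List.pyGetD G1 j PySem.Set.empty) i) with hG2
    have hlen1 : G1.length = n.toNat := by rw [hG1, len_setD]; exact hlen
    have hlen2 : G2.length = n.toNat := by rw [hG2, len_setD]; exact hlen1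
    have hlenI : ((Gacc.length : Nat) : Int) = n := by rw [hlen]; omega
    have hlenI1 : ((G1.length : Nat) : Int) = n := by rw [hlen1]; omega
    have hg1 : ∀ k, 0 ≤ k → k < n → PySem.List.pyGetD G1 k PySem.Set.empty =
        if k = i then PySem.Set.add (PySem.List.pyGetD Gacc i PySem.Set.empty) j
        else PySem.List.pyGetD Gacc k PySem.Set.empty := by
      intro k hk0 hk
      rw [hG1]
      exact getD_upd Gacc i k _ _ hib.1 (by omega) hk0 (by omega)
    have hg2 : ∀ k, 0 ≤ k → k < n → PySem.List.pyGetD G2 k PySem.Set.empty =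
        if k = j then PySem.Set.add (PySem.List.pyGetD G1 j PySem.Set.empty) i
        else PySem.List.pyGetD G1 k PySem.Set.empty := by
      intro k hk0 hk
      rw [hG2]
      exact getD_upd G1 j k _ _ hjb.1 (by omega) hk0 (by omega)
    have hch2 : ∀ k, 0 ≤ k → k < n → ∀ x,
        x ∈ PySem.List.pyGetD G2 k PySem.Set.empty ↔ adjE (proc ++ [e]) k x := by
      intro k hk0 hk x
      rw [hg2 k hk0 hk, adj_snoc_char, ← hie, ← hje]
      by_cases hkj : k = j
      · rw [hkj, if_pos rfl, PySem.Set.mem_add, hg1 j hjb.1 hjb.2]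
        by_cases hji : j = i
        · rw [hji, if_pos rfl, PySem.Set.mem_add, hch i hib.1 hib.2]
          tauto
        · rw [if_neg hji, hch j hjb.1 hjb.2]
          tauto
      · rw [if_neg hkj, hg1 k hk0 hk]
        by_cases hki : k = i
        · rw [hki, if_pos rfl, PySem.Set.mem_add, hch i hib.1 hib.2]
          by_cases hij : i = j
          · exact absurd (hki.trans hij) hkj
          · tauto
        · rw [if_neg hki, hch k hk0 hk]
          tauto
    have := ihs (proc ++ [e]) G2 hokes hlen2 hch2
    rw [List.append_assoc] at this
    simpa using this

-- the set of component minima below k: first nodes of their component in A's scan order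
noncomputable def minsB (n : Int) (cs : List (List Int)) (k : Int) : Finset Int :=
  @Finset.filter Int (fun x => x < k ∧ ∀ y, 0 ≤ y → y < x → ¬ ReachE cs y x)
    (Classical.decPred (fun x => x < k ∧ ∀ y, 0 ≤ y → y < x → ¬ ReachE cs y x))
    (Finset.Icc 0 (n-1))

-- the list [0, 1, ..., K-1] of Int node ids, in A's scan order
def natsTo (K : Nat) : List Int := (List.range K).map Int.ofNat

theorem natsTo_succ (K : Nat) : natsTo (K+1) = natsTo K ++ [(K : Int)] := by
  unfold natsTo
  rw [List.range_succ, List.map_append]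
  rfl

theorem mem_minsB {n : Int} {cs : List (List Int)} {k x : Int} :
    x ∈ minsB n cs k ↔ (0 ≤ x ∧ x ≤ n - 1) ∧
      (x < k ∧ ∀ y, 0 ≤ y → y < x → ¬ ReachE cs y x) := by
  unfold minsB
  rw [@Finset.mem_filter Int _ (Classical.decPred _) _ _, Finset.mem_Icc]

theorem loopA {n : Int} {G : List (PySem.Set Int)} {cs : List (List Int)}
    (hn : 0 ≤ n) (hok : edgesOK n cs)
    (hG : ∀ i, 0 ≤ i → i < n → ∀ j, j ∈ PySem.List.pyGetD G i PySem.Set.empty ↔ adjE cs i j) :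
    ∀ K : Nat, K ≤ n.toNat →
      (((natsTo K).foldl
          (fun (st : Int × List Int) i => let p := dfsA G n.toNat st.2 i; (st.1 + p.1, p.2))
          (0, List.replicate n.toNat 0)).2.length = n.toNat) ∧
      ClosedX n cs ((natsTo K).foldl
          (fun (st : Int × List Int) i => let p := dfsA G n.toNat st.2 i; (st.1 + p.1, p.2))
          (0, List.replicate n.toNat 0)).2 (fun _ => False) ∧
      (∀ x, 0 ≤ x → x < n →
        (memS ((natsTo K).foldl
          (fun (st : Int × List Int) i => let p := dfsA G n.toNat st.2 i; (st.1 + p.1, p.2))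
          (0, List.replicate n.toNat 0)).2 x ↔
          ∃ y : Int, 0 ≤ y ∧ y < (K : Int) ∧ ReachE cs y x)) ∧
      ((natsTo K).foldl
          (fun (st : Int × List Int) i => let p := dfsA G n.toNat st.2 i; (st.1 + p.1, p.2))
          (0, List.replicate n.toNat 0)).1 = ((minsB n cs (K : Int)).card : Int) := by
  intro K
  induction K with
  | zero =>
    intro _
    simp only [natsTo, List.range_zero, List.map_nil, List.foldl_nil]
    have hmemrep : ∀ x : Int, ¬ memS (List.replicate n.toNat (0 : Int)) x := by
      intro x hx
      unfold memS at hx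
      exact hx (getD_replicate_zero _ _)
    refine ⟨by simp, ?_, ?_, ?_⟩
    · intro x y _ _ hmx _
      exact absurd hmx (hmemrep x)
    · intro x _ _
      constructor
      · intro h; exact absurd h (hmemrep x)
      · rintro ⟨y, hy0, hy1, _⟩; omega
    · have : minsB n cs 0 = ∅ := by
        apply Finset.eq_empty_of_forall_notMem
        intro x hx
        rw [mem_minsB] at hx
        omega
      simp [this]
  | succ K ih =>
    intro hK1
    have hKN : K ≤ n.toNat := by omega
    have hKn : (K : Int) < n := by omega
    have hK0 : (0 : Int) ≤ (K : Int) := by positivity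
    obtain ⟨hlen, hcl, hmem, hsum⟩ := ih hKN
    set st := ((natsTo K).foldl
          (fun (st : Int × List Int) i => let p := dfsA G n.toNat st.2 i; (st.1 + p.1, p.2))
          (0, List.replicate n.toNat 0)) with hst
    have hstep : ((natsTo (K+1)).foldl
          (fun (st : Int × List Int) i => let p := dfsA G n.toNat st.2 i; (st.1 + p.1, p.2))
          (0, List.replicate n.toNat 0)) =
        (st.1 + (dfsA G n.toNat st.2 (K : Int)).1, (dfsA G n.toNat st.2 (K : Int)).2) := by
      rw [natsTo_succ, List.foldl_append, ← hst]
      simp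
    rw [hstep]
    have hfull := dfs_full hn hok hG n.toNat st.2 (K : Int) hK0 hKn hlen
      (le_trans (zc_le _) (le_of_eq hlen)) hcl
    obtain ⟨hiff, hcl', hret, hlen'⟩ := hfull
    have hcast : ((K : Int) + 1) = ((K + 1 : Nat) : Int) := by push_cast; ring
    refine ⟨hlen', hcl', ?_, ?_⟩
    · intro x hx0 hx
      rw [hiff x hx0 hx, hmem x hx0 hx]
      constructor
      · rintro (⟨y, hy0, hy1, hr⟩ | hr)
        · exact ⟨y, hy0, by omega, hr⟩
        · exact ⟨(K : Int), hK0, by omega, hr⟩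
      · rintro ⟨y, hy0, hy1, hr⟩
        have : y < (K : Int) ∨ y = (K : Int) := by omega
        rcases this with h | rfl
        · exact Or.inl ⟨y, hy0, h, hr⟩
        · exact Or.inr hr
    · by_cases hm : memS st.2 (K : Int)
      · rw [hret.1 hm]
        have heq : minsB n cs ((K + 1 : Nat) : Int) = minsB n cs (K : Int) := by
          apply Finset.ext
          intro x
          rw [mem_minsB, mem_minsB]
          constructor
          · rintro ⟨hIcc, hlt, hmc⟩
            refine ⟨hIcc, ?_, hmc⟩
            rcases eq_or_ne x (K : Int) with rfl | hne
            · obtain ⟨y, hy0, hy1, hr⟩ := (hmem _ hK0 hKn).1 hm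
              exact absurd hr (hmc y hy0 hy1)
            · omega
          · rintro ⟨hIcc, hlt, hmc⟩
            exact ⟨hIcc, by omega, hmc⟩
        rw [heq, hsum, add_zero]
      · rw [hret.2 hm]
        have hKmc : ∀ y, 0 ≤ y → y < (K : Int) → ¬ ReachE cs y (K : Int) := by
          intro y hy0 hy1 hr
          exact hm ((hmem _ hK0 hKn).2 ⟨y, hy0, hy1, hr⟩)
        have hnotmem : (K : Int) ∉ minsB n cs (K : Int) := by
          rw [mem_minsB]; omega
        have heq : minsB n cs ((K + 1 : Nat) : Int) = insert (K : Int) (minsB n cs (K : Int)) := by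
          apply Finset.ext
          intro x
          rw [Finset.mem_insert, mem_minsB, mem_minsB]
          constructor
          · rintro ⟨hIcc, hlt, hmc⟩
            rcases eq_or_ne x (K : Int) with rfl | hne
            · exact Or.inl rfl
            · exact Or.inr ⟨hIcc, by omega, hmc⟩
          · rintro (rfl | ⟨hIcc, hlt, hmc⟩)
            · exact ⟨⟨hK0, by omega⟩, by omega, hKmc⟩
            · exact ⟨hIcc, by omega, hmc⟩
        rw [heq, Finset.card_insert_of_notMem hnotmem, hsum]
        push_cast
        ring

-- ===== B side: the label-merging invariant =====

def Binv (n : Int) (cs : List (List Int)) (st : List Int × Int) : Prop :=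
  st.1.length = n.toNat ∧
  (∀ x, 0 ≤ x → x < n → 0 ≤ valC st.1 x ∧ valC st.1 x < n) ∧
  (∀ x y, 0 ≤ x → x < n → 0 ≤ y → y < n → (valC st.1 x = valC st.1 y ↔ ReachE cs x y)) ∧
  st.2 = (((Finset.Icc (0:Int) (n-1)).image (fun x => valC st.1 x)).card : Int)

theorem mv_eq {a b c1 c2 : Int} (hab : a ≠ b) :
    ((if c1 = b then a else c1) = (if c2 = b then a else c2)) ↔
    (c1 = c2 ∨ (c1 = a ∧ c2 = b) ∨ (c1 = b ∧ c2 = a)) := by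
  by_cases h1 : c1 = b <;> by_cases h2 : c2 = b <;> simp [h1, h2] <;> omega

theorem Bstep {n : Int} (hn : 0 ≤ n) (proc : List (List Int)) (e : List Int)
    (st : List Int × Int) (he : e.length = 2 ∧ ∀ x ∈ e, 0 ≤ x ∧ x < n)
    (hinv : Binv n proc st) :
    Binv n (proc ++ [e])
      ((fun (st : List Int × Int) e =>
        let a := PySem.List.pyGetD st.1 (PySem.List.pyGetD e 0 0) 0
        let b := PySem.List.pyGetD st.1 (PySem.List.pyGetD e 1 0) 0
        if a ≠ b then (st.1.map (fun c => if c = b then a else c), st.2 - 1) else st) st e) := by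
  obtain ⟨hlen, hrange, hiff, hcnt⟩ := hinv
  set i := PySem.List.pyGetD e 0 0 with hie
  set j := PySem.List.pyGetD e 1 0 with hje
  have hib : 0 ≤ i ∧ i < n := by
    have : i ∈ e := by rw [pair_eq e he.1, ← hie, ← hje]; simp
    exact he.2 i this
  have hjb : 0 ≤ j ∧ j < n := by
    have : j ∈ e := by rw [pair_eq e he.1, ← hie, ← hje]; simp
    exact he.2 j this
  have hred : ((fun (st : List Int × Int) e =>
        let a := PySem.List.pyGetD st.1 (PySem.List.pyGetD e 0 0) 0
        let b := PySem.List.pyGetD st.1 (PySem.List.pyGetD e 1 0) 0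
        if a ≠ b then (st.1.map (fun c => if c = b then a else c), st.2 - 1) else st) st e) =
      (if valC st.1 i ≠ valC st.1 j then
        (st.1.map (fun c => if c = valC st.1 j then valC st.1 i else c), st.2 - 1) else st) := rfl
  rw [hred]
  by_cases hab : valC st.1 i = valC st.1 j
  · rw [if_neg (not_not_intro hab)]
    have hij : ReachE proc i j := (hiff i j hib.1 hib.2 hjb.1 hjb.2).1 hab
    refine ⟨hlen, hrange, ?_, hcnt⟩
    intro x y hx0 hx hy0 hy
    rw [reach_snoc_same hie.symm hje.symm hij, hiff x y hx0 hx hy0 hy]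
  · rw [if_pos hab]
    set a := valC st.1 i with ha
    set b := valC st.1 j with hb
    have hlenI : ((st.1.length : Nat) : Int) = n := by rw [hlen]; omega
    have hval : ∀ x, 0 ≤ x → x < n →
        valC (st.1.map (fun c => if c = b then a else c)) x =
        (if valC st.1 x = b then a else valC st.1 x) := by
      intro x hx0 hx
      exact getD_map' (fun c => if c = b then a else c) st.1 x 0 0 hx0 (by omega)
    refine ⟨by simpa using hlen, ?_, ?_, ?_⟩
    · intro x hx0 hx
      rw [hval x hx0 hx]
      split
      · exact hrange i hib.1 hib.2
      · exact hrange x hx0 hx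
    · intro x y hx0 hx hy0 hy
      rw [hval x hx0 hx, hval y hy0 hy, mv_eq hab,
        reach_snoc hie.symm hje.symm x y]
      have hxa : valC st.1 x = a ↔ ReachE proc x i := hiff x i hx0 hx hib.1 hib.2
      have hxb : valC st.1 x = b ↔ ReachE proc x j := hiff x j hx0 hx hjb.1 hjb.2
      have hya : valC st.1 y = a ↔ ReachE proc y i := hiff y i hy0 hy hib.1 hib.2
      have hyb : valC st.1 y = b ↔ ReachE proc y j := hiff y j hy0 hy hjb.1 hjb.2
      have hxy : valC st.1 x = valC st.1 y ↔ ReachE proc x y := hiff x y hx0 hx hy0 hy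
      constructor
      · rintro (h | ⟨h1, h2⟩ | ⟨h1, h2⟩)
        · exact Or.inl (hxy.1 h)
        · exact Or.inr (Or.inl ⟨hxa.1 h1, reachE_symm (hyb.1 h2)⟩)
        · exact Or.inr (Or.inr ⟨hxb.1 h1, reachE_symm (hya.1 h2)⟩)
      · rintro (h | ⟨h1, h2⟩ | ⟨h1, h2⟩)
        · exact Or.inl (hxy.2 h)
        · exact Or.inr (Or.inl ⟨hxa.2 h1, hyb.2 (reachE_symm h2)⟩)
        · exact Or.inr (Or.inr ⟨hxb.2 h1, hya.2 (reachE_symm h2)⟩)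
    · have hicc : ∀ z, 0 ≤ z → z < n → z ∈ Finset.Icc (0:Int) (n-1) := by
        intro z hz0 hz; rw [Finset.mem_Icc]; omega
      set S := (Finset.Icc (0:Int) (n-1)).image (fun x => valC st.1 x) with hS
      have haS : a ∈ S := by
        rw [hS]; exact Finset.mem_image.2 ⟨i, hicc i hib.1 hib.2, rfl⟩
      have hbS : b ∈ S := by
        rw [hS]; exact Finset.mem_image.2 ⟨j, hicc j hjb.1 hjb.2, rfl⟩
      have himg : (Finset.Icc (0:Int) (n-1)).image
          (fun x => valC (st.1.map (fun c => if c = b then a else c)) x) =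
          S.image (fun c => if c = b then a else c) := by
        rw [hS, Finset.image_image]
        apply Finset.image_congr
        intro x hx
        rw [Finset.coe_Icc, Set.mem_Icc] at hx
        exact hval x hx.1 (by omega)
      have herase : S.image (fun c => if c = b then a else c) = S.erase b := by
        apply Finset.ext
        intro z
        rw [Finset.mem_image, Finset.mem_erase]
        constructor
        · rintro ⟨c, hc, rfl⟩
          by_cases hcb : c = b
          · simp only [hcb, if_pos rfl]
            exact ⟨hab, haS⟩
          · simp only [if_neg hcb]
            exact ⟨hcb, hc⟩
        · rintro ⟨hzb, hz⟩
          exact ⟨z, hz, by simp [hzb]⟩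
      have hcard : 1 ≤ S.card := Finset.card_pos.2 ⟨b, hbS⟩
      have : (S.erase b).card = S.card - 1 := Finset.card_erase_of_mem hbS
      rw [himg, herase, this, hcnt]
      show (S.card : Int) - 1 = ((S.card - 1 : Nat) : Int)
      omega

theorem loopB {n : Int} (hn : 0 ≤ n) :
    ∀ (suffix proc : List (List Int)) (st : List Int × Int), edgesOK n suffix →
      Binv n proc st →
      Binv n (proc ++ suffix)
        (suffix.foldl (fun (st : List Int × Int) e =>
          let a := PySem.List.pyGetD st.1 (PySem.List.pyGetD e 0 0) 0
          let b := PySem.List.pyGetD st.1 (PySem.List.pyGetD e 1 0) 0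
          if a ≠ b then (st.1.map (fun c => if c = b then a else c), st.2 - 1) else st) st) := by
  intro suffix
  induction suffix with
  | nil => intro proc st _ hinv; simpa using hinv
  | cons e es ihs =>
    intro proc st hok hinv
    rw [List.foldl_cons]
    have hstep := Bstep hn proc e st (hok e (by simp)) hinv
    have := ihs (proc ++ [e]) _ (fun e' he' => hok e' (by simp [he'])) hstep
    rw [List.append_assoc] at this
    simpa using this

theorem Binit {n : Int} (hn : 0 ≤ n) : Binv n [] (PySem.List.pyRange 0 n 1, n) := by
  have hval : ∀ x, 0 ≤ x → x < n → valC (PySem.List.pyRange 0 n 1) x = x := by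
    intro x hx0 hx
    exact getD_pyRange_id n x hx0 hx
  refine ⟨by simp [PySem.List.length_pyRange_one], ?_, ?_, ?_⟩
  · intro x hx0 hx
    rw [hval x hx0 hx]; exact ⟨hx0, hx⟩
  · intro x y hx0 hx hy0 hy
    rw [hval x hx0 hx, hval y hy0 hy, reach_nil]
  · have : (Finset.Icc (0:Int) (n-1)).image (fun x => valC (PySem.List.pyRange 0 n 1) x) =
        Finset.Icc (0:Int) (n-1) := by
      have := Finset.image_congr (s := Finset.Icc (0:Int) (n-1))
        (f := fun x => valC (PySem.List.pyRange 0 n 1) x) (g := fun x => x)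
        (by intro x hx; rw [Finset.coe_Icc, Set.mem_Icc] at hx; exact hval x hx.1 (by omega))
      rw [this]
      apply Finset.image_id
    rw [this, Int.card_Icc]
    omega

-- ===== the counting bridge: #(scan-order component minima) = #(distinct labels) =====

theorem bridge {n : Int} {cs : List (List Int)} (hn : 0 ≤ n) (f : Int → Int)
    (hf : ∀ x y, 0 ≤ x → x < n → 0 ≤ y → y < n → (f x = f y ↔ ReachE cs x y)) :
    (minsB n cs n).card = ((Finset.Icc (0:Int) (n-1)).image f).card := by
  apply Finset.card_bij (fun x _ => f x)
  · intro x hx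
    rw [mem_minsB] at hx
    exact Finset.mem_image_of_mem f (Finset.mem_Icc.2 ⟨hx.1.1, hx.1.2⟩)
  · intro x1 h1 x2 h2 heq
    rw [mem_minsB] at h1 h2
    have hr : ReachE cs x1 x2 :=
      (hf x1 x2 h1.1.1 (by omega) h2.1.1 (by omega)).1 heq
    rcases lt_trichotomy x1 x2 with h | h | h
    · exact absurd hr (h2.2.2 x1 h1.1.1 h)
    · exact h
    · exact absurd (reachE_symm hr) (h1.2.2 x2 h2.1.1 h)
  · intro v hv
    obtain ⟨x0, hx0m, rfl⟩ := Finset.mem_image.1 hv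
    rw [Finset.mem_Icc] at hx0m
    set T := @Finset.filter Int (fun z => ReachE cs z x0)
      (Classical.decPred (fun z => ReachE cs z x0)) (Finset.Icc 0 (n-1)) with hT
    have hmemT : ∀ z, z ∈ T ↔ (0 ≤ z ∧ z ≤ n - 1) ∧ ReachE cs z x0 := by
      intro z
      rw [hT, @Finset.mem_filter Int _ (Classical.decPred _) _ _, Finset.mem_Icc]
    have hx0T : x0 ∈ T := (hmemT x0).2 ⟨hx0m, .refl⟩
    have hne : T.Nonempty := ⟨x0, hx0T⟩
    have hmT := (hmemT _).1 (T.min'_mem hne)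
    refine ⟨T.min' hne, mem_minsB.2 ⟨hmT.1, by omega, ?_⟩, ?_⟩
    · intro y hy0 hym hr
      have hyT : y ∈ T := (hmemT y).2 ⟨⟨hy0, by omega⟩, hr.trans hmT.2⟩
      have := T.min'_le y hyT
      omega
    · exact (hf _ x0 hmT.1.1 (by omega) hx0m.1 (by omega)).2 hmT.2

theorem pyRange_eq_natsTo (n : Int) : PySem.List.pyRange 0 n 1 = natsTo n.toNat := by
  rw [PySem.List.pyRange_one]
  unfold natsTo
  simp

-- ===== VERDICT (by name: the statement is the Claim_ definition above) =====
theorem makeConnected_spec : Claim_equal_makeConnected := by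
  intro n cs hdom hpre
  unfold Spec_makeConnected makeConnected makeConnected_alt
  by_cases hg : (cs.length : Int) < n - 1
  · simp only [if_pos hg]
  · simp only [if_neg hg]
    obtain hg' | ⟨hn, hokp⟩ := hpre
    · exact absurd hg' hg
    have hok : edgesOK n cs := hokp
    -- A side: the built adjacency structure describes adjE, and the scan counts minima
    have hbase : ∀ i : Int, 0 ≤ i → i < n → ∀ x : Int,
        x ∈ PySem.List.pyGetD (List.replicate n.toNat (PySem.Set.empty : PySem.Set Int))
          i PySem.Set.empty ↔ adjE [] i x := by
      intro i _ _ x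
      rw [getD_replicate_self]
      constructor
      · intro h; simp [PySem.Set.empty] at h
      · rintro ⟨e, he, _⟩; simp at he
    have hbuild := buildG hn cs [] (List.replicate n.toNat PySem.Set.empty) hok
      (by simp) hbase
    rw [List.nil_append] at hbuild
    obtain ⟨hGlen, hGch⟩ := hbuild
    have hA := loopA hn hok hGch n.toNat (le_refl _)
    have hAval := hA.2.2.2
    have hNcast : ((n.toNat : Nat) : Int) = n := Int.toNat_of_nonneg hn
    rw [hNcast] at hAval
    -- B side: the label-merge fold keeps the component invariant
    have hB := loopB hn cs [] (PySem.List.pyRange 0 n 1, n) hok (Binit hn)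
    rw [List.nil_append] at hB
    obtain ⟨_, _, hBiff, hBval⟩ := hB
    have hbr := bridge hn _ hBiff
    have h2 : ((minsB n cs n).card : Int) = _ := congrArg Nat.cast hbr
    conv_lhs => rw [pyRange_eq_natsTo]
    exact congrArg (fun z : Int => z - 1) (hAval.trans (h2.trans hBval.symm))
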